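-- pv_equiv track=rewrite | github.com/helalifaker/Budget-App | backend/app/services/cascade_service.py | get_downstream_steps
-- ===== SOURCE A (Python) =====
-- CASCADE_DEPENDENCIES: dict[str, list[str]] = {
--     "enrollment": ["class_structure", "revenue"],
--     "class_structure": ["dhg"],
--     "dhg": ["costs"],
--     "revenue": [],
--     "costs": [],
--     "capex": [],
-- }
--
-- CALCULATION_ORDER = [
--     "enrollment",
--     "class_structure",
--     "dhg",
--     "revenue",
--     "costs",
--     "capex",
-- ]
--
-- def get_downstream_steps(step_id: str, visited: set[str] | None = None) -> list[str]:
--     """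
--     Get all downstream steps that need recalculation (recursively).
--     Returns steps in topological order for correct execution sequence.
--     """
--     if visited is None:
--         visited = set()
--
--     if step_id in visited:
--         return []
--     visited.add(step_id)
--
--     direct_deps = CASCADE_DEPENDENCIES.get(step_id, [])
--     all_deps: list[str] = []
--
--     for dep in direct_deps:
--         all_deps.append(dep)
--         all_deps.extend(get_downstream_steps(dep, visited))
--
--     # Remove duplicates while preserving order
--     seen: set[str] = set()
--     result: list[str] = []
--     for dep in all_deps:
--         if dep not in seen:
--             seen.add(dep)
--             result.append(dep)
--
--     # Sort by calculation order to ensure correct sequence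
--     return sorted(result, key=lambda x: CALCULATION_ORDER.index(x) if x in CALCULATION_ORDER else 999)
-- ===== SOURCE B (Python) =====
-- CASCADE_DEPENDENCIES: dict[str, list[str]] = {
--     "enrollment": ["class_structure", "revenue"],
--     "class_structure": ["dhg"],
--     "dhg": ["costs"],
--     "revenue": [],
--     "costs": [],
--     "capex": [],
-- }
--
-- CALCULATION_ORDER = [
--     "enrollment",
--     "class_structure",
--     "dhg",
--     "revenue",
--     "costs",
--     "capex",
-- ]
--
--
-- def get_downstream_steps(step_id: str, visited: set[str] | None = None) -> list[str]:
--     """Iterative worklist version: expand reachable nodes with an explicit stack,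
--     collect every direct child of each expanded node, then emit the collected
--     steps in calculation order."""
--     if visited is None:
--         visited = set()
--     collected: set[str] = set()
--     stack = [step_id]
--     while stack:
--         node = stack.pop()
--         if node in visited:
--             continue
--         visited.add(node)
--         for child in CASCADE_DEPENDENCIES.get(node, []):
--             collected.add(child)
--             stack.append(child)
--     return [x for x in CALCULATION_ORDER if x in collected]
-- ===== Notes on version B (the rewrite author's own statement) =====
-- stated objective: alternative
-- what changed: Replaced the recursive DFS that builds an ordered dep list and then dedups and key-sorts it with an explicit worklist loop that collects children into a set and finally filters CALCULATION_ORDER by membership.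
import Mathlib
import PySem

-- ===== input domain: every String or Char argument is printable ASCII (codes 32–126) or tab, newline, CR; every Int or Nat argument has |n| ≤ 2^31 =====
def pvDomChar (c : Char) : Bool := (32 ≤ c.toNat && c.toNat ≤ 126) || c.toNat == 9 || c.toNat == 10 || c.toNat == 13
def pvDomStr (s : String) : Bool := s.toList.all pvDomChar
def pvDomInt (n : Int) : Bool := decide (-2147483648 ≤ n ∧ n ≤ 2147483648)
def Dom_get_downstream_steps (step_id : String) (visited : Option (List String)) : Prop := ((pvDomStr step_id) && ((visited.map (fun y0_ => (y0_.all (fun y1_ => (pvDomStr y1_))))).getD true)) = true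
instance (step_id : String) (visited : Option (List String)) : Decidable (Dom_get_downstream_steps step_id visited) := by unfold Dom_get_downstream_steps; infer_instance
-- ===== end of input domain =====

-- B replaces A's recursive DFS + ordered dedup + keyed sort by an explicit worklist loop
-- that collects the children of every expanded node into a set and then emits the
-- collected steps by one filter pass over CALCULATION_ORDER; equal return values
-- (both Pythons also extend the caller's `visited` set with the same elements).

def CASCADE_DEPENDENCIES : PySem.Dict String (List String) := PySem.Dict.ofList
  [("enrollment", ["class_structure", "revenue"]),
   ("class_structure", ["dhg"]),
   ("dhg", ["costs"]),
   ("revenue", []),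
   ("costs", []),
   ("capex", [])]

def CALCULATION_ORDER : List String :=
  ["enrollment", "class_structure", "dhg", "revenue", "costs", "capex"]

-- ===== PORT A =====
-- A's recursion, fuel-bounded (fuel 16 exceeds the deepest possible chain of recursive
-- calls on this fixed 6-node dependency graph); threads the mutated `visited` set.
def goA : Nat → String → PySem.Set String → (List String × PySem.Set String)
  | 0, _, v => ([], v)
  | f + 1, step_id, v =>
    if PySem.Set.contains v step_id then ([], v)
    else
      let v := PySem.Set.add v step_id
      let direct_deps := PySem.Dict.getD CASCADE_DEPENDENCIES step_id []
      direct_deps.foldl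
        (fun (st : List String × PySem.Set String) dep =>
          let sub := goA f dep st.2
          (st.1 ++ [dep] ++ sub.1, sub.2))
        ([], v)

-- A's seen/result dedup loop is exactly PySem.List.dedup (first occurrences, in order).
def get_downstream_steps (step_id : String) (visited : Option (List String)) : List String :=
  let v : PySem.Set String := visited.getD PySem.Set.empty
  let all_deps := (goA 16 step_id v).1
  let result := PySem.List.dedup all_deps
  PySem.List.sorted result
    (fun x => if CALCULATION_ORDER.contains x then
                (((PySem.List.index? CALCULATION_ORDER x).getD 0 : Nat) : Int)
              else 999)

-- ===== PORT B =====
-- B's while-loop over the explicit stack, fuel-bounded (each iteration pops once;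
-- at most 16 iterations can occur on this graph).
def goB : Nat → List String → PySem.Set String → PySem.Set String → PySem.Set String
  | 0, _, _, coll => coll
  | f + 1, stack, v, coll =>
    match stack with
    | [] => coll
    | node :: rest =>
      if PySem.Set.contains v node then goB f rest v coll
      else
        let v := PySem.Set.add v node
        let children := PySem.Dict.getD CASCADE_DEPENDENCIES node []
        goB f (children.reverse ++ rest) v (children.foldl PySem.Set.add coll)

def get_downstream_steps_alt (step_id : String) (visited : Option (List String)) : List String :=
  let v : PySem.Set String := visited.getD PySem.Set.empty
  let collected := goB 16 [step_id] v PySem.Set.empty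
  CALCULATION_ORDER.filter (fun x => PySem.Set.contains collected x)

-- ===== PRECONDITION & SPEC =====
def Spec_get_downstream_steps (step_id : String) (visited : Option (List String)) (out : List String) : Prop := out = get_downstream_steps_alt step_id visited
instance (step_id : String) (visited : Option (List String)) (out : List String) : Decidable (Spec_get_downstream_steps step_id visited out) := by unfold Spec_get_downstream_steps; infer_instance

-- ===== CLAIM (what is proved, stated in full; the proofs are below) =====
def Claim_equal_get_downstream_steps : Prop := ∀ (step_id : String) (visited : Option (List String)), Dom_get_downstream_steps step_id visited → Spec_get_downstream_steps step_id visited (get_downstream_steps step_id visited)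

-- ===== LEMMAS AND PROOFS =====

lemma fst_ite {α β : Type} (c : Prop) [Decidable c] (x y : α × β) :
    (if c then x else y).1 = if c then x.1 else y.1 := by split <;> rfl

lemma snd_ite {α β : Type} (c : Prop) [Decidable c] (x y : α × β) :
    (if c then x else y).2 = if c then x.2 else y.2 := by split <;> rfl

lemma dep_e : PySem.Dict.getD CASCADE_DEPENDENCIES "enrollment" [] = ["class_structure", "revenue"] := by decide
lemma dep_cs : PySem.Dict.getD CASCADE_DEPENDENCIES "class_structure" [] = ["dhg"] := by decide
lemma dep_d : PySem.Dict.getD CASCADE_DEPENDENCIES "dhg" [] = ["costs"] := by decide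
lemma dep_r : PySem.Dict.getD CASCADE_DEPENDENCIES "revenue" [] = [] := by decide
lemma dep_c : PySem.Dict.getD CASCADE_DEPENDENCIES "costs" [] = [] := by decide
lemma dep_x : PySem.Dict.getD CASCADE_DEPENDENCIES "capex" [] = [] := by decide

lemma dep_other (s : String) (h1 : "enrollment" ≠ s) (h2 : "class_structure" ≠ s)
    (h3 : "dhg" ≠ s) (h4 : "revenue" ≠ s) (h5 : "costs" ≠ s) (h6 : "capex" ≠ s) :
    PySem.Dict.getD CASCADE_DEPENDENCIES s [] = [] := by
  have hitems : CASCADE_DEPENDENCIES.items =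
      [("enrollment", ["class_structure", "revenue"]), ("class_structure", ["dhg"]),
       ("dhg", ["costs"]), ("revenue", []), ("costs", []), ("capex", [])] := by decide
  have e1 : ("enrollment" == s) = false := beq_eq_false_iff_ne.mpr h1
  have e2 : ("class_structure" == s) = false := beq_eq_false_iff_ne.mpr h2
  have e3 : ("dhg" == s) = false := beq_eq_false_iff_ne.mpr h3
  have e4 : ("revenue" == s) = false := beq_eq_false_iff_ne.mpr h4
  have e5 : ("costs" == s) = false := beq_eq_false_iff_ne.mpr h5
  have e6 : ("capex" == s) = false := beq_eq_false_iff_ne.mpr h6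
  simp [PySem.Dict.getD, PySem.Dict.get?, hitems, List.find?, e1, e2, e3, e4, e5, e6]

lemma case_e_000 (v : PySem.Set String) (h1 : ¬ ("enrollment" ∈ v)) (h2 : ¬ ("class_structure" ∈ v)) (h3 : ¬ ("dhg" ∈ v)) :
    get_downstream_steps "enrollment" (some v) = get_downstream_steps_alt "enrollment" (some v) := by
  have hA : ∀ f : Nat, (goA (f + 5) "enrollment" v).1 = ["class_structure", "dhg", "costs", "revenue"] := by
    intro f
    simp [goA, fst_ite, snd_ite, dep_e, dep_cs, dep_d, dep_r, dep_c, dep_x, h1, h2, h3]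
  have hB : ∀ f : Nat, goB (f + 6) ["enrollment"] v PySem.Set.empty = ["class_structure", "revenue", "dhg", "costs"] := by
    intro f
    simp [goB, fst_ite, snd_ite, dep_e, dep_cs, dep_d, dep_r, dep_c, dep_x, h1, h2, h3]
  simp only [get_downstream_steps, get_downstream_steps_alt, Option.getD]
  rw [show goA 16 "enrollment" v = goA (11 + 5) "enrollment" v from rfl,
      show goB 16 ["enrollment"] v PySem.Set.empty = goB (10 + 6) ["enrollment"] v PySem.Set.empty from rfl,
      hA 11, hB 10]
  decide

lemma case_e_001 (v : PySem.Set String) (h1 : ¬ ("enrollment" ∈ v)) (h2 : ¬ ("class_structure" ∈ v)) (h3 : ("dhg" ∈ v)) :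
    get_downstream_steps "enrollment" (some v) = get_downstream_steps_alt "enrollment" (some v) := by
  have hA : ∀ f : Nat, (goA (f + 5) "enrollment" v).1 = ["class_structure", "dhg", "revenue"] := by
    intro f
    simp [goA, fst_ite, snd_ite, dep_e, dep_cs, dep_d, dep_r, dep_c, dep_x, h1, h2, h3]
  have hB : ∀ f : Nat, goB (f + 6) ["enrollment"] v PySem.Set.empty = ["class_structure", "revenue", "dhg"] := by
    intro f
    simp [goB, fst_ite, snd_ite, dep_e, dep_cs, dep_d, dep_r, dep_c, dep_x, h1, h2, h3]
  simp only [get_downstream_steps, get_downstream_steps_alt, Option.getD]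
  rw [show goA 16 "enrollment" v = goA (11 + 5) "enrollment" v from rfl,
      show goB 16 ["enrollment"] v PySem.Set.empty = goB (10 + 6) ["enrollment"] v PySem.Set.empty from rfl,
      hA 11, hB 10]
  decide

lemma case_e_010 (v : PySem.Set String) (h1 : ¬ ("enrollment" ∈ v)) (h2 : ("class_structure" ∈ v)) (h3 : ¬ ("dhg" ∈ v)) :
    get_downstream_steps "enrollment" (some v) = get_downstream_steps_alt "enrollment" (some v) := by
  have hA : ∀ f : Nat, (goA (f + 5) "enrollment" v).1 = ["class_structure", "revenue"] := by
    intro f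
    simp [goA, fst_ite, snd_ite, dep_e, dep_cs, dep_d, dep_r, dep_c, dep_x, h1, h2, h3]
  have hB : ∀ f : Nat, goB (f + 6) ["enrollment"] v PySem.Set.empty = ["class_structure", "revenue"] := by
    intro f
    simp [goB, fst_ite, snd_ite, dep_e, dep_cs, dep_d, dep_r, dep_c, dep_x, h1, h2, h3]
  simp only [get_downstream_steps, get_downstream_steps_alt, Option.getD]
  rw [show goA 16 "enrollment" v = goA (11 + 5) "enrollment" v from rfl,
      show goB 16 ["enrollment"] v PySem.Set.empty = goB (10 + 6) ["enrollment"] v PySem.Set.empty from rfl,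
      hA 11, hB 10]
  decide

lemma case_e_011 (v : PySem.Set String) (h1 : ¬ ("enrollment" ∈ v)) (h2 : ("class_structure" ∈ v)) (h3 : ("dhg" ∈ v)) :
    get_downstream_steps "enrollment" (some v) = get_downstream_steps_alt "enrollment" (some v) := by
  have hA : ∀ f : Nat, (goA (f + 5) "enrollment" v).1 = ["class_structure", "revenue"] := by
    intro f
    simp [goA, fst_ite, snd_ite, dep_e, dep_cs, dep_d, dep_r, dep_c, dep_x, h1, h2, h3]
  have hB : ∀ f : Nat, goB (f + 6) ["enrollment"] v PySem.Set.empty = ["class_structure", "revenue"] := by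
    intro f
    simp [goB, fst_ite, snd_ite, dep_e, dep_cs, dep_d, dep_r, dep_c, dep_x, h1, h2, h3]
  simp only [get_downstream_steps, get_downstream_steps_alt, Option.getD]
  rw [show goA 16 "enrollment" v = goA (11 + 5) "enrollment" v from rfl,
      show goB 16 ["enrollment"] v PySem.Set.empty = goB (10 + 6) ["enrollment"] v PySem.Set.empty from rfl,
      hA 11, hB 10]
  decide

lemma case_e_100 (v : PySem.Set String) (h1 : ("enrollment" ∈ v)) (h2 : ¬ ("class_structure" ∈ v)) (h3 : ¬ ("dhg" ∈ v)) :
    get_downstream_steps "enrollment" (some v) = get_downstream_steps_alt "enrollment" (some v) := by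
  have hA : ∀ f : Nat, (goA (f + 5) "enrollment" v).1 = [] := by
    intro f
    simp [goA, fst_ite, snd_ite, dep_e, dep_cs, dep_d, dep_r, dep_c, dep_x, h1, h2, h3]
  have hB : ∀ f : Nat, goB (f + 6) ["enrollment"] v PySem.Set.empty = [] := by
    intro f
    simp [goB, fst_ite, snd_ite, dep_e, dep_cs, dep_d, dep_r, dep_c, dep_x, h1, h2, h3]
  simp only [get_downstream_steps, get_downstream_steps_alt, Option.getD]
  rw [show goA 16 "enrollment" v = goA (11 + 5) "enrollment" v from rfl,
      show goB 16 ["enrollment"] v PySem.Set.empty = goB (10 + 6) ["enrollment"] v PySem.Set.empty from rfl,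
      hA 11, hB 10]
  decide

lemma case_e_101 (v : PySem.Set String) (h1 : ("enrollment" ∈ v)) (h2 : ¬ ("class_structure" ∈ v)) (h3 : ("dhg" ∈ v)) :
    get_downstream_steps "enrollment" (some v) = get_downstream_steps_alt "enrollment" (some v) := by
  have hA : ∀ f : Nat, (goA (f + 5) "enrollment" v).1 = [] := by
    intro f
    simp [goA, fst_ite, snd_ite, dep_e, dep_cs, dep_d, dep_r, dep_c, dep_x, h1, h2, h3]
  have hB : ∀ f : Nat, goB (f + 6) ["enrollment"] v PySem.Set.empty = [] := by
    intro f
    simp [goB, fst_ite, snd_ite, dep_e, dep_cs, dep_d, dep_r, dep_c, dep_x, h1, h2, h3]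
  simp only [get_downstream_steps, get_downstream_steps_alt, Option.getD]
  rw [show goA 16 "enrollment" v = goA (11 + 5) "enrollment" v from rfl,
      show goB 16 ["enrollment"] v PySem.Set.empty = goB (10 + 6) ["enrollment"] v PySem.Set.empty from rfl,
      hA 11, hB 10]
  decide

lemma case_e_110 (v : PySem.Set String) (h1 : ("enrollment" ∈ v)) (h2 : ("class_structure" ∈ v)) (h3 : ¬ ("dhg" ∈ v)) :
    get_downstream_steps "enrollment" (some v) = get_downstream_steps_alt "enrollment" (some v) := by
  have hA : ∀ f : Nat, (goA (f + 5) "enrollment" v).1 = [] := by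
    intro f
    simp [goA, fst_ite, snd_ite, dep_e, dep_cs, dep_d, dep_r, dep_c, dep_x, h1, h2, h3]
  have hB : ∀ f : Nat, goB (f + 6) ["enrollment"] v PySem.Set.empty = [] := by
    intro f
    simp [goB, fst_ite, snd_ite, dep_e, dep_cs, dep_d, dep_r, dep_c, dep_x, h1, h2, h3]
  simp only [get_downstream_steps, get_downstream_steps_alt, Option.getD]
  rw [show goA 16 "enrollment" v = goA (11 + 5) "enrollment" v from rfl,
      show goB 16 ["enrollment"] v PySem.Set.empty = goB (10 + 6) ["enrollment"] v PySem.Set.empty from rfl,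
      hA 11, hB 10]
  decide

lemma case_e_111 (v : PySem.Set String) (h1 : ("enrollment" ∈ v)) (h2 : ("class_structure" ∈ v)) (h3 : ("dhg" ∈ v)) :
    get_downstream_steps "enrollment" (some v) = get_downstream_steps_alt "enrollment" (some v) := by
  have hA : ∀ f : Nat, (goA (f + 5) "enrollment" v).1 = [] := by
    intro f
    simp [goA, fst_ite, snd_ite, dep_e, dep_cs, dep_d, dep_r, dep_c, dep_x, h1, h2, h3]
  have hB : ∀ f : Nat, goB (f + 6) ["enrollment"] v PySem.Set.empty = [] := by
    intro f
    simp [goB, fst_ite, snd_ite, dep_e, dep_cs, dep_d, dep_r, dep_c, dep_x, h1, h2, h3]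
  simp only [get_downstream_steps, get_downstream_steps_alt, Option.getD]
  rw [show goA 16 "enrollment" v = goA (11 + 5) "enrollment" v from rfl,
      show goB 16 ["enrollment"] v PySem.Set.empty = goB (10 + 6) ["enrollment"] v PySem.Set.empty from rfl,
      hA 11, hB 10]
  decide

lemma case_cs_00 (v : PySem.Set String) (h1 : ¬ ("class_structure" ∈ v)) (h2 : ¬ ("dhg" ∈ v)) :
    get_downstream_steps "class_structure" (some v) = get_downstream_steps_alt "class_structure" (some v) := by
  have hA : ∀ f : Nat, (goA (f + 5) "class_structure" v).1 = ["dhg", "costs"] := by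
    intro f
    simp [goA, fst_ite, snd_ite, dep_e, dep_cs, dep_d, dep_r, dep_c, dep_x, h1, h2]
  have hB : ∀ f : Nat, goB (f + 6) ["class_structure"] v PySem.Set.empty = ["dhg", "costs"] := by
    intro f
    simp [goB, fst_ite, snd_ite, dep_e, dep_cs, dep_d, dep_r, dep_c, dep_x, h1, h2]
  simp only [get_downstream_steps, get_downstream_steps_alt, Option.getD]
  rw [show goA 16 "class_structure" v = goA (11 + 5) "class_structure" v from rfl,
      show goB 16 ["class_structure"] v PySem.Set.empty = goB (10 + 6) ["class_structure"] v PySem.Set.empty from rfl,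
      hA 11, hB 10]
  decide

lemma case_cs_01 (v : PySem.Set String) (h1 : ¬ ("class_structure" ∈ v)) (h2 : ("dhg" ∈ v)) :
    get_downstream_steps "class_structure" (some v) = get_downstream_steps_alt "class_structure" (some v) := by
  have hA : ∀ f : Nat, (goA (f + 5) "class_structure" v).1 = ["dhg"] := by
    intro f
    simp [goA, fst_ite, snd_ite, dep_e, dep_cs, dep_d, dep_r, dep_c, dep_x, h1, h2]
  have hB : ∀ f : Nat, goB (f + 6) ["class_structure"] v PySem.Set.empty = ["dhg"] := by
    intro f
    simp [goB, fst_ite, snd_ite, dep_e, dep_cs, dep_d, dep_r, dep_c, dep_x, h1, h2]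
  simp only [get_downstream_steps, get_downstream_steps_alt, Option.getD]
  rw [show goA 16 "class_structure" v = goA (11 + 5) "class_structure" v from rfl,
      show goB 16 ["class_structure"] v PySem.Set.empty = goB (10 + 6) ["class_structure"] v PySem.Set.empty from rfl,
      hA 11, hB 10]
  decide

lemma case_cs_10 (v : PySem.Set String) (h1 : ("class_structure" ∈ v)) (h2 : ¬ ("dhg" ∈ v)) :
    get_downstream_steps "class_structure" (some v) = get_downstream_steps_alt "class_structure" (some v) := by
  have hA : ∀ f : Nat, (goA (f + 5) "class_structure" v).1 = [] := by
    intro f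
    simp [goA, fst_ite, snd_ite, dep_e, dep_cs, dep_d, dep_r, dep_c, dep_x, h1, h2]
  have hB : ∀ f : Nat, goB (f + 6) ["class_structure"] v PySem.Set.empty = [] := by
    intro f
    simp [goB, fst_ite, snd_ite, dep_e, dep_cs, dep_d, dep_r, dep_c, dep_x, h1, h2]
  simp only [get_downstream_steps, get_downstream_steps_alt, Option.getD]
  rw [show goA 16 "class_structure" v = goA (11 + 5) "class_structure" v from rfl,
      show goB 16 ["class_structure"] v PySem.Set.empty = goB (10 + 6) ["class_structure"] v PySem.Set.empty from rfl,
      hA 11, hB 10]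
  decide

lemma case_cs_11 (v : PySem.Set String) (h1 : ("class_structure" ∈ v)) (h2 : ("dhg" ∈ v)) :
    get_downstream_steps "class_structure" (some v) = get_downstream_steps_alt "class_structure" (some v) := by
  have hA : ∀ f : Nat, (goA (f + 5) "class_structure" v).1 = [] := by
    intro f
    simp [goA, fst_ite, snd_ite, dep_e, dep_cs, dep_d, dep_r, dep_c, dep_x, h1, h2]
  have hB : ∀ f : Nat, goB (f + 6) ["class_structure"] v PySem.Set.empty = [] := by
    intro f
    simp [goB, fst_ite, snd_ite, dep_e, dep_cs, dep_d, dep_r, dep_c, dep_x, h1, h2]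
  simp only [get_downstream_steps, get_downstream_steps_alt, Option.getD]
  rw [show goA 16 "class_structure" v = goA (11 + 5) "class_structure" v from rfl,
      show goB 16 ["class_structure"] v PySem.Set.empty = goB (10 + 6) ["class_structure"] v PySem.Set.empty from rfl,
      hA 11, hB 10]
  decide

lemma case_d_0 (v : PySem.Set String) (h1 : ¬ ("dhg" ∈ v)) :
    get_downstream_steps "dhg" (some v) = get_downstream_steps_alt "dhg" (some v) := by
  have hA : ∀ f : Nat, (goA (f + 5) "dhg" v).1 = ["costs"] := by
    intro f
    simp [goA, fst_ite, snd_ite, dep_e, dep_cs, dep_d, dep_r, dep_c, dep_x, h1]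
  have hB : ∀ f : Nat, goB (f + 6) ["dhg"] v PySem.Set.empty = ["costs"] := by
    intro f
    simp [goB, fst_ite, snd_ite, dep_e, dep_cs, dep_d, dep_r, dep_c, dep_x, h1]
  simp only [get_downstream_steps, get_downstream_steps_alt, Option.getD]
  rw [show goA 16 "dhg" v = goA (11 + 5) "dhg" v from rfl,
      show goB 16 ["dhg"] v PySem.Set.empty = goB (10 + 6) ["dhg"] v PySem.Set.empty from rfl,
      hA 11, hB 10]
  decide

lemma case_d_1 (v : PySem.Set String) (h1 : ("dhg" ∈ v)) :
    get_downstream_steps "dhg" (some v) = get_downstream_steps_alt "dhg" (some v) := by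
  have hA : ∀ f : Nat, (goA (f + 5) "dhg" v).1 = [] := by
    intro f
    simp [goA, fst_ite, snd_ite, dep_e, dep_cs, dep_d, dep_r, dep_c, dep_x, h1]
  have hB : ∀ f : Nat, goB (f + 6) ["dhg"] v PySem.Set.empty = [] := by
    intro f
    simp [goB, fst_ite, snd_ite, dep_e, dep_cs, dep_d, dep_r, dep_c, dep_x, h1]
  simp only [get_downstream_steps, get_downstream_steps_alt, Option.getD]
  rw [show goA 16 "dhg" v = goA (11 + 5) "dhg" v from rfl,
      show goB 16 ["dhg"] v PySem.Set.empty = goB (10 + 6) ["dhg"] v PySem.Set.empty from rfl,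
      hA 11, hB 10]
  decide

lemma case_r_0 (v : PySem.Set String) (h1 : ¬ ("revenue" ∈ v)) :
    get_downstream_steps "revenue" (some v) = get_downstream_steps_alt "revenue" (some v) := by
  have hA : ∀ f : Nat, (goA (f + 5) "revenue" v).1 = [] := by
    intro f
    simp [goA, fst_ite, snd_ite, dep_e, dep_cs, dep_d, dep_r, dep_c, dep_x, h1]
  have hB : ∀ f : Nat, goB (f + 6) ["revenue"] v PySem.Set.empty = [] := by
    intro f
    simp [goB, fst_ite, snd_ite, dep_e, dep_cs, dep_d, dep_r, dep_c, dep_x, h1]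
  simp only [get_downstream_steps, get_downstream_steps_alt, Option.getD]
  rw [show goA 16 "revenue" v = goA (11 + 5) "revenue" v from rfl,
      show goB 16 ["revenue"] v PySem.Set.empty = goB (10 + 6) ["revenue"] v PySem.Set.empty from rfl,
      hA 11, hB 10]
  decide

lemma case_r_1 (v : PySem.Set String) (h1 : ("revenue" ∈ v)) :
    get_downstream_steps "revenue" (some v) = get_downstream_steps_alt "revenue" (some v) := by
  have hA : ∀ f : Nat, (goA (f + 5) "revenue" v).1 = [] := by
    intro f
    simp [goA, fst_ite, snd_ite, dep_e, dep_cs, dep_d, dep_r, dep_c, dep_x, h1]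
  have hB : ∀ f : Nat, goB (f + 6) ["revenue"] v PySem.Set.empty = [] := by
    intro f
    simp [goB, fst_ite, snd_ite, dep_e, dep_cs, dep_d, dep_r, dep_c, dep_x, h1]
  simp only [get_downstream_steps, get_downstream_steps_alt, Option.getD]
  rw [show goA 16 "revenue" v = goA (11 + 5) "revenue" v from rfl,
      show goB 16 ["revenue"] v PySem.Set.empty = goB (10 + 6) ["revenue"] v PySem.Set.empty from rfl,
      hA 11, hB 10]
  decide

lemma case_c_0 (v : PySem.Set String) (h1 : ¬ ("costs" ∈ v)) :
    get_downstream_steps "costs" (some v) = get_downstream_steps_alt "costs" (some v) := by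
  have hA : ∀ f : Nat, (goA (f + 5) "costs" v).1 = [] := by
    intro f
    simp [goA, fst_ite, snd_ite, dep_e, dep_cs, dep_d, dep_r, dep_c, dep_x, h1]
  have hB : ∀ f : Nat, goB (f + 6) ["costs"] v PySem.Set.empty = [] := by
    intro f
    simp [goB, fst_ite, snd_ite, dep_e, dep_cs, dep_d, dep_r, dep_c, dep_x, h1]
  simp only [get_downstream_steps, get_downstream_steps_alt, Option.getD]
  rw [show goA 16 "costs" v = goA (11 + 5) "costs" v from rfl,
      show goB 16 ["costs"] v PySem.Set.empty = goB (10 + 6) ["costs"] v PySem.Set.empty from rfl,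
      hA 11, hB 10]
  decide

lemma case_c_1 (v : PySem.Set String) (h1 : ("costs" ∈ v)) :
    get_downstream_steps "costs" (some v) = get_downstream_steps_alt "costs" (some v) := by
  have hA : ∀ f : Nat, (goA (f + 5) "costs" v).1 = [] := by
    intro f
    simp [goA, fst_ite, snd_ite, dep_e, dep_cs, dep_d, dep_r, dep_c, dep_x, h1]
  have hB : ∀ f : Nat, goB (f + 6) ["costs"] v PySem.Set.empty = [] := by
    intro f
    simp [goB, fst_ite, snd_ite, dep_e, dep_cs, dep_d, dep_r, dep_c, dep_x, h1]
  simp only [get_downstream_steps, get_downstream_steps_alt, Option.getD]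
  rw [show goA 16 "costs" v = goA (11 + 5) "costs" v from rfl,
      show goB 16 ["costs"] v PySem.Set.empty = goB (10 + 6) ["costs"] v PySem.Set.empty from rfl,
      hA 11, hB 10]
  decide

lemma case_x_0 (v : PySem.Set String) (h1 : ¬ ("capex" ∈ v)) :
    get_downstream_steps "capex" (some v) = get_downstream_steps_alt "capex" (some v) := by
  have hA : ∀ f : Nat, (goA (f + 5) "capex" v).1 = [] := by
    intro f
    simp [goA, fst_ite, snd_ite, dep_e, dep_cs, dep_d, dep_r, dep_c, dep_x, h1]
  have hB : ∀ f : Nat, goB (f + 6) ["capex"] v PySem.Set.empty = [] := by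
    intro f
    simp [goB, fst_ite, snd_ite, dep_e, dep_cs, dep_d, dep_r, dep_c, dep_x, h1]
  simp only [get_downstream_steps, get_downstream_steps_alt, Option.getD]
  rw [show goA 16 "capex" v = goA (11 + 5) "capex" v from rfl,
      show goB 16 ["capex"] v PySem.Set.empty = goB (10 + 6) ["capex"] v PySem.Set.empty from rfl,
      hA 11, hB 10]
  decide

lemma case_x_1 (v : PySem.Set String) (h1 : ("capex" ∈ v)) :
    get_downstream_steps "capex" (some v) = get_downstream_steps_alt "capex" (some v) := by
  have hA : ∀ f : Nat, (goA (f + 5) "capex" v).1 = [] := by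
    intro f
    simp [goA, fst_ite, snd_ite, dep_e, dep_cs, dep_d, dep_r, dep_c, dep_x, h1]
  have hB : ∀ f : Nat, goB (f + 6) ["capex"] v PySem.Set.empty = [] := by
    intro f
    simp [goB, fst_ite, snd_ite, dep_e, dep_cs, dep_d, dep_r, dep_c, dep_x, h1]
  simp only [get_downstream_steps, get_downstream_steps_alt, Option.getD]
  rw [show goA 16 "capex" v = goA (11 + 5) "capex" v from rfl,
      show goB 16 ["capex"] v PySem.Set.empty = goB (10 + 6) ["capex"] v PySem.Set.empty from rfl,
      hA 11, hB 10]
  decide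

lemma case_other (s : String) (v : PySem.Set String) (h1 : s ≠ "enrollment")
    (h2 : s ≠ "class_structure") (h3 : s ≠ "dhg") (h4 : s ≠ "revenue")
    (h5 : s ≠ "costs") (h6 : s ≠ "capex") :
    get_downstream_steps s (some v) = get_downstream_steps_alt s (some v) := by
  have hdep := dep_other s (Ne.symm h1) (Ne.symm h2) (Ne.symm h3) (Ne.symm h4) (Ne.symm h5) (Ne.symm h6)
  have hA : ∀ f : Nat, (goA (f + 1) s v).1 = [] := by
    intro f
    by_cases hc : s ∈ v <;> simp [goA, hc, hdep]
  have hB : ∀ f : Nat, goB (f + 2) [s] v PySem.Set.empty = [] := by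
    intro f
    by_cases hc : s ∈ v <;> simp [goB, hc, hdep]
  simp only [get_downstream_steps, get_downstream_steps_alt, Option.getD]
  rw [show goA 16 s v = goA (15 + 1) s v from rfl,
      show goB 16 [s] v PySem.Set.empty = goB (14 + 2) [s] v PySem.Set.empty from rfl,
      hA 15, hB 14]
  decide

lemma main_lemma (step_id : String) (v : List String) :
    get_downstream_steps step_id (some v) = get_downstream_steps_alt step_id (some v) := by
  by_cases he_e : step_id = "enrollment"
  · subst he_e
    by_cases hb1 : "enrollment" ∈ v
    ·
      by_cases hb2 : "class_structure" ∈ v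
      ·
        by_cases hb3 : "dhg" ∈ v
        ·
          exact case_e_111 v hb1 hb2 hb3
        ·
          exact case_e_110 v hb1 hb2 hb3
      ·
        by_cases hb3 : "dhg" ∈ v
        ·
          exact case_e_101 v hb1 hb2 hb3
        ·
          exact case_e_100 v hb1 hb2 hb3
    ·
      by_cases hb2 : "class_structure" ∈ v
      ·
        by_cases hb3 : "dhg" ∈ v
        ·
          exact case_e_011 v hb1 hb2 hb3
        ·
          exact case_e_010 v hb1 hb2 hb3
      ·
        by_cases hb3 : "dhg" ∈ v
        ·
          exact case_e_001 v hb1 hb2 hb3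
        ·
          exact case_e_000 v hb1 hb2 hb3
  by_cases he_cs : step_id = "class_structure"
  · subst he_cs
    by_cases hb1 : "class_structure" ∈ v
    ·
      by_cases hb2 : "dhg" ∈ v
      ·
        exact case_cs_11 v hb1 hb2
      ·
        exact case_cs_10 v hb1 hb2
    ·
      by_cases hb2 : "dhg" ∈ v
      ·
        exact case_cs_01 v hb1 hb2
      ·
        exact case_cs_00 v hb1 hb2
  by_cases he_d : step_id = "dhg"
  · subst he_d
    by_cases hb1 : "dhg" ∈ v
    ·
      exact case_d_1 v hb1
    ·
      exact case_d_0 v hb1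
  by_cases he_r : step_id = "revenue"
  · subst he_r
    by_cases hb1 : "revenue" ∈ v
    ·
      exact case_r_1 v hb1
    ·
      exact case_r_0 v hb1
  by_cases he_c : step_id = "costs"
  · subst he_c
    by_cases hb1 : "costs" ∈ v
    ·
      exact case_c_1 v hb1
    ·
      exact case_c_0 v hb1
  by_cases he_x : step_id = "capex"
  · subst he_x
    by_cases hb1 : "capex" ∈ v
    ·
      exact case_x_1 v hb1
    ·
      exact case_x_0 v hb1
  exact case_other step_id v he_e he_cs he_d he_r he_c he_x

-- ===== VERDICT (by name: the statement is the Claim_ definition above) =====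
theorem get_downstream_steps_spec : Claim_equal_get_downstream_steps := by
  intro step_id visited _
  unfold Spec_get_downstream_steps
  cases visited with
  | none => exact main_lemma step_id []
  | some v => exact main_lemma step_id v
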